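-- pv_equiv track=rewrite | github.com/piskvorky/gensim | gensim/corpora/wikicorpus.py | remove_template
-- ===== SOURCE A (Python) =====
-- def remove_template(s):
--     """Remove template wikimedia markup.
--
--     Parameters
--     ----------
--     s : str
--         String containing markup template.
--
--     Returns
--     -------
--     str
--         Сopy of `s` with all the wikimedia markup template removed. See [4]_ for wikimedia templates details.
--
--     Notes
--     -----
--     Since template can be nested, it is difficult remove them using regular expressions.
--
--     References
--     ----------
--     .. [4] http://meta.wikimedia.org/wiki/Help:Template
--
--     """
--
--     # Find the start and end position of each template by finding the opening
--     # '{{' and closing '}}'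
--     n_open, n_close = 0, 0
--     starts, ends = [], []
--     in_template = False
--     prev_c = None
--     for i, c in enumerate(iter(s)):
--         if not in_template:
--             if c == '{' and c == prev_c:
--                 starts.append(i - 1)
--                 in_template = True
--                 n_open = 1
--         if in_template:
--             if c == '{':
--                 n_open += 1
--             elif c == '}':
--                 n_close += 1
--             if n_open == n_close:
--                 ends.append(i)
--                 in_template = False
--                 n_open, n_close = 0, 0
--         prev_c = c
--
--     # Remove all the templates
--     return ''.join([s[end + 1:start] for start, end in zip(starts + [None], [-1] + ends)])
-- ===== SOURCE B (Python) =====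
-- def remove_template(s):
--     out = []
--     in_template = False
--     depth = 0
--     pending = False  # a lone '{' seen outside a template (possible start of '{{')
--     for c in s:
--         if in_template:
--             if c == '{':
--                 depth += 1
--             elif c == '}':
--                 depth -= 1
--                 if depth == 0:
--                     in_template = False
--         elif c == '{':
--             if pending:
--                 pending = False
--                 in_template = True
--                 depth = 2
--             else:
--                 pending = True
--         else:
--             if pending:
--                 out.append('{')
--                 pending = False
--             out.append(c)
--     if pending:
--         out.append('{')
--     return ''.join(out)
-- ===== Notes on version B (the rewrite author's own statement) =====
-- stated objective: alternative
-- what changed: B removes templates in a single streaming pass that emits characters directly (tracking in_template, a brace depth, and a pending lone '{'), instead of A's two-phase recording of start/end index lists followed by joining slices of the original string.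
import Mathlib
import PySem

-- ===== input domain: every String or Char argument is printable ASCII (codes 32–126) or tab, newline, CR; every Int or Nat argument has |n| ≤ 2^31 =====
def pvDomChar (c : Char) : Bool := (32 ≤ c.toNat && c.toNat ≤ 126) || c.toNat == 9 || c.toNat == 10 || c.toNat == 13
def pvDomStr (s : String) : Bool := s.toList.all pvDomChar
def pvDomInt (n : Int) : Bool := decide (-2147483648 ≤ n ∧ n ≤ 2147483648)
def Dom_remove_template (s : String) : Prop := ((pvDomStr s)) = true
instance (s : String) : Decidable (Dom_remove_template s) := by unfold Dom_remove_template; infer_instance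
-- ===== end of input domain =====

-- B replaces A's two-phase "record template start/end index lists, then join slices" by a single
-- streaming pass that emits characters directly; same O(n) cost, different decomposition.

-- ===== PORT A =====

structure AState where
  nOpen : Int
  nClose : Int
  starts : List Int
  ends : List Int
  inTemplate : Bool
  prev : Option Char
deriving Repr, DecidableEq

def stepA (st : AState) (ic : Int × Char) : AState :=
  let i := ic.1
  let c := ic.2
  -- if not in_template: if c == '{' and c == prev_c: record start, enter template, n_open = 1
  let st1 :=
    if st.inTemplate = false then
      if c = '{' ∧ st.prev = some c then
        { st with starts := st.starts ++ [i - 1], inTemplate := true, nOpen := 1 }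
      else st
    else st
  -- if in_template: count braces, close when n_open == n_close
  let st2 :=
    if st1.inTemplate = true then
      let st' :=
        if c = '{' then { st1 with nOpen := st1.nOpen + 1 }
        else if c = '}' then { st1 with nClose := st1.nClose + 1 }
        else st1
      if st'.nOpen = st'.nClose then
        { st' with ends := st'.ends ++ [i], inTemplate := false, nOpen := 0, nClose := 0 }
      else st'
    else st1
  { st2 with prev := some c }

-- ''.join([s[end + 1:start] for start, end in zip(starts + [None], [-1] + ends)])
def joinA (cs : List Char) (starts ends : List Int) : List Char :=
  PySem.Chars.join []
    (((starts.map some ++ [none]).zip ((-1 : Int) :: ends)).map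
      (fun q : Option Int × Int => PySem.List.slice cs (some (q.2 + 1)) q.1))

def remove_template (s : String) : String :=
  let fin := (PySem.List.enumerate s.toList 0).foldl stepA ⟨0, 0, [], [], false, none⟩
  String.ofList (joinA s.toList fin.starts fin.ends)

-- ===== PORT B =====

def goB : List Char → List Char → Bool → Int → Bool → List Char
  | [], out, _, _, pending => out ++ (if pending then ['{'] else [])
  | c :: rest, out, inT, depth, pending =>
    if inT then
      if c = '{' then goB rest out true (depth + 1) pending
      else if c = '}' then
        if depth - 1 = 0 then goB rest out false (depth - 1) pending
        else goB rest out true (depth - 1) pending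
      else goB rest out inT depth pending
    else if c = '{' then
      if pending then goB rest out true 2 false
      else goB rest out false depth true
    else
      goB rest ((out ++ (if pending then ['{'] else [])) ++ [c]) false depth false

def remove_template_alt (s : String) : String :=
  String.ofList (goB s.toList [] false 0 false)

-- ===== PRECONDITION & SPEC =====
def Spec_remove_template (s : String) (out : String) : Prop := out = remove_template_alt s
instance (s : String) (out : String) : Decidable (Spec_remove_template s out) := by unfold Spec_remove_template; infer_instance

-- ===== CLAIM (what is proved, stated in full; the proofs are below) =====
def Claim_equal_remove_template : Prop := ∀ (s : String), Dom_remove_template s → Spec_remove_template s (remove_template s)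

-- ===== LEMMAS AND PROOFS =====

-- last recorded template end (or -1): the '[-1] + ends' sentinel of A
def lastE (ends : List Int) : Int := ((-1 : Int) :: ends).getLast (List.cons_ne_nil _ _)

-- completed "between templates" pieces: slices s[end+1:start] for the zipped pairs
def PJ (cs : List Char) (starts ends : List Int) : List Char :=
  ((starts.zip ((-1 : Int) :: ends)).map
      (fun q : Int × Int => PySem.List.slice cs (some (q.2 + 1)) (some q.1))).flatten

theorem join_empty_flatten (l : List (List Char)) : PySem.Chars.join [] l = l.flatten := by
  induction l with
  | nil => rw [PySem.Chars.join_nil]; rfl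
  | cons x xs ih =>
    cases xs with
    | nil => simp [PySem.Chars.join_singleton]
    | cons y ys =>
      rw [PySem.Chars.join_cons_cons]
      simp only [List.flatten_cons] at ih ⊢
      rw [← ih]
      simp only [List.append_nil]

-- loop invariant tying A's index-list state to B's emitted buffer after p characters
def LoopInv (cs : List Char) (p : Nat) (st : AState) (out : List Char) (depth : Int) (pending : Bool) : Prop :=
  p ≤ cs.length ∧
  (if st.inTemplate then
    pending = false ∧
    st.starts.length = st.ends.length + 1 ∧
    depth = st.nOpen - st.nClose ∧ 1 ≤ depth ∧
    out = PJ cs st.starts st.ends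
  else
    (pending = true ↔ st.prev = some '{') ∧
    st.nOpen = 0 ∧ st.nClose = 0 ∧
    st.starts.length = st.ends.length ∧
    -1 ≤ lastE st.ends ∧ lastE st.ends + 1 ≤ (p : Int) ∧
    out ++ (if pending then ['{'] else []) =
      PJ cs st.starts st.ends ++ PySem.List.slice cs (some (lastE st.ends + 1)) (some (p : Int)) ∧
    (pending = true → 1 ≤ p ∧ cs[p - 1]? = some '{' ∧ lastE st.ends + 1 ≤ (p : Int) - 1))

theorem slice_snoc (cs : List Char) (a : Int) (p : Nat) (h0 : 0 ≤ a) (h1 : a ≤ (p : Int))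
    (c : Char) (hc : cs[p]? = some c) :
    PySem.List.slice cs (some a) (some ((p : Int) + 1)) =
      PySem.List.slice cs (some a) (some (p : Int)) ++ [c] := by
  rw [PySem.List.slice_toNat cs h0 (by omega), PySem.List.slice_toNat cs h0 (by omega)]
  have ha : a.toNat ≤ p := by omega
  have h1' : ((p : Int) + 1).toNat = p + 1 := by omega
  have h2' : ((p : Int)).toNat = p := by omega
  rw [h1', h2', show p + 1 - a.toNat = (p - a.toNat) + 1 by omega, List.take_add_one]
  have : (List.drop a.toNat cs)[p - a.toNat]? = some c := by
    rw [List.getElem?_drop, show a.toNat + (p - a.toNat) = p by omega]; exact hc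
  rw [this]
  rfl

theorem slice_nil (cs : List Char) (a : Int) (h0 : 0 ≤ a) :
    PySem.List.slice cs (some a) (some a) = [] := by
  rw [PySem.List.slice_toNat cs h0 h0]
  simp

theorem slice_to_end (cs : List Char) (a : Int) (h0 : 0 ≤ a) :
    PySem.List.slice cs (some a) (some (cs.length : Int)) = PySem.List.slice cs (some a) none := by
  rw [PySem.List.slice_toNat cs h0 (by omega), PySem.List.slice_from cs h0]
  apply List.take_of_length_le
  simp

theorem zip_prefix_right {α β : Type} (a : List α) (b c : List β) (h : a.length ≤ b.length) :
    a.zip (b ++ c) = a.zip b := by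
  induction a generalizing b with
  | nil => simp
  | cons x a' ih =>
    cases b with
    | nil => simp at h
    | cons y b' =>
      simp only [List.cons_append, List.zip_cons_cons]
      rw [ih b' (by simpa using h)]

theorem zip_prefix_left {α β : Type} (a c : List α) (b : List β) (h : b.length ≤ a.length) :
    (a ++ c).zip b = a.zip b := by
  induction a generalizing b with
  | nil =>
    cases b with
    | nil => simp
    | cons y b' => simp at h
  | cons x a' ih =>
    cases b with
    | nil => simp
    | cons y b' =>
      simp only [List.cons_append, List.zip_cons_cons]
      rw [ih b' (by simpa using h)]

theorem zip_snoc {α β : Type} (a : List α) (x : α) (b : List β) (hb : b ≠ [])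
    (h : a.length + 1 = b.length) :
    (a ++ [x]).zip b = a.zip b ++ [(x, b.getLast hb)] := by
  induction a generalizing b with
  | nil =>
    cases b with
    | nil => simp at h
    | cons y b' =>
      have : b' = [] := by simpa using h.symm
      subst this; simp
  | cons z a' ih =>
    cases b with
    | nil => simp at h
    | cons y b' =>
      have hb' : b' ≠ [] := by
        cases b' with
        | nil => simp at h
        | cons _ _ => simp
      simp only [List.cons_append, List.zip_cons_cons]
      rw [ih b' hb' (by simpa using h), List.getLast_cons hb']

theorem PJ_ends_append (cs : List Char) (starts ends : List Int) (x : Int)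
    (h : starts.length ≤ ends.length + 1) :
    PJ cs starts (ends ++ [x]) = PJ cs starts ends := by
  unfold PJ
  rw [show (-1 : Int) :: (ends ++ [x]) = ((-1 : Int) :: ends) ++ [x] by simp,
    zip_prefix_right starts ((-1 : Int) :: ends) [x] (by simpa using h)]

theorem PJ_starts_append (cs : List Char) (starts ends : List Int) (x : Int)
    (h : starts.length = ends.length) :
    PJ cs (starts ++ [x]) ends =
      PJ cs starts ends ++ PySem.List.slice cs (some (lastE ends + 1)) (some x) := by
  unfold PJ lastE
  rw [zip_snoc starts x ((-1 : Int) :: ends) (List.cons_ne_nil _ _) (by simp [h])]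
  simp

theorem joinA_inT (cs : List Char) (starts ends : List Int) (h : starts.length = ends.length + 1) :
    joinA cs starts ends = PJ cs starts ends := by
  unfold joinA PJ
  rw [join_empty_flatten,
    zip_prefix_left (starts.map some) [none] ((-1 : Int) :: ends) (by simp [h]),
    List.zip_map_left, List.map_map]
  congr 1

theorem joinA_notT (cs : List Char) (starts ends : List Int) (h : starts.length = ends.length) :
    joinA cs starts ends =
      PJ cs starts ends ++ PySem.List.slice cs (some (lastE ends + 1)) none := by
  unfold joinA PJ lastE
  rw [join_empty_flatten,
    zip_snoc (starts.map some) none ((-1 : Int) :: ends) (List.cons_ne_nil _ _) (by simp [h])]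
  rw [List.map_append, List.flatten_append, List.zip_map_left, List.map_map]
  simp only [List.map_singleton, List.flatten_cons, List.flatten_nil, List.append_nil]
  congr 1

theorem lastE_concat (l : List Int) (x : Int) : lastE (l ++ [x]) = x := by
  unfold lastE
  exact List.getLast_concat (l := (-1 : Int) :: l) (a := x)

theorem main_inv (rest : List Char) : ∀ (cs : List Char) (p : Nat) (st : AState)
    (out : List Char) (depth : Int) (pending : Bool),
    p + rest.length = cs.length → cs.drop p = rest →
    LoopInv cs p st out depth pending →
    joinA cs ((PySem.List.enumerate rest (p : Int)).foldl stepA st).starts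
      ((PySem.List.enumerate rest (p : Int)).foldl stepA st).ends
      = goB rest out st.inTemplate depth pending := by
  induction rest with
  | nil =>
    intro cs p st out depth pending hlen hdrop hInv
    simp only [List.length_nil, Nat.add_zero] at hlen
    obtain ⟨hple, hIf⟩ := hInv
    simp only [PySem.List.enumerate_nil, List.foldl_nil, goB]
    cases hT : st.inTemplate with
    | true =>
      rw [hT] at hIf; simp only [if_true] at hIf
      obtain ⟨hpend, hlenSE, _, _, hout⟩ := hIf
      rw [joinA_inT cs st.starts st.ends hlenSE, hpend]
      simp [hout]
    | false =>
      rw [hT] at hIf; simp only [if_false, Bool.false_eq_true] at hIf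
      obtain ⟨hpend, hnO, hnC, hlenSE, hl0, hl1, hout, hpi⟩ := hIf
      rw [hlen] at hout
      rw [slice_to_end cs (lastE st.ends + 1) (by omega)] at hout
      rw [joinA_notT cs st.starts st.ends hlenSE]
      exact hout.symm
  | cons c rest' ih =>
    intro cs p st out depth pending hlen hdrop hInv
    have hlen' : (p + 1) + rest'.length = cs.length := by
      simp only [List.length_cons] at hlen; omega
    have hplt : p < cs.length := by omega
    have hdrop' : cs.drop (p + 1) = rest' := by
      have := congrArg (List.drop 1) hdrop
      simpa [List.drop_drop] using this
    have hcp : cs[p]? = some c := by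
      rw [← List.head?_drop, hdrop]; rfl
    obtain ⟨hple, hIf⟩ := hInv
    rw [PySem.List.enumerate_cons, List.foldl_cons,
      show ((p : Int) + 1) = ((p + 1 : Nat) : Int) by push_cast; ring]
    cases hT : st.inTemplate with
    | true =>
      rw [hT] at hIf; simp only [if_true] at hIf
      obtain ⟨hpend, hlenSE, hdepth, hdep1, hout⟩ := hIf
      by_cases hc : c = '{'
      · -- inside template, opening brace: depth grows
        subst hc
        have hstep : stepA st ((p : Int), '{') =
            { st with nOpen := st.nOpen + 1, prev := some '{' } := by
          have hne : ¬(st.nOpen + 1 = st.nClose) := by omega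
          simp [stepA, hT, hne]
        have hnew : LoopInv cs (p + 1)
            { st with nOpen := st.nOpen + 1, prev := some '{' } out (depth + 1) pending := by
          unfold LoopInv
          refine ⟨by omega, ?_⟩
          simp only [hT, if_true]
          exact ⟨hpend, hlenSE, by omega, by omega, hout⟩
        rw [hstep]
        simp only [goB, if_true]
        simpa [hT] using ih cs (p + 1) _ out (depth + 1) pending hlen' hdrop' hnew
      · by_cases hc2 : c = '}'
        · subst hc2
          by_cases hclose : depth - 1 = 0
          · -- closing brace that ends the template
            have hstep : stepA st ((p : Int), '}') =
                { st with nClose := 0, nOpen := 0, ends := st.ends ++ [(p : Int)],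
                          inTemplate := false, prev := some '}' } := by
              have hoc : st.nOpen = st.nClose + 1 := by omega
              simp [stepA, hT, hc, hoc]
            have hnew : LoopInv cs (p + 1)
                { st with nClose := 0, nOpen := 0, ends := st.ends ++ [(p : Int)],
                          inTemplate := false, prev := some '}' } out (depth - 1) pending := by
              unfold LoopInv
              refine ⟨by omega, ?_, ?_, ?_, ?_, ?_, ?_, ?_, ?_⟩
              · rw [hpend]; simp
              · rfl
              · rfl
              · simp [hlenSE]
              · rw [lastE_concat]; omega
              · rw [lastE_concat]; push_cast; omega
              · rw [hpend, lastE_concat, PJ_ends_append cs st.starts st.ends _ (by omega),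
                  show (((p + 1 : Nat)) : Int) = (p : Int) + 1 by push_cast; ring,
                  slice_nil cs ((p : Int) + 1) (by omega)]
                simp [hout]
              · rw [hpend]; simp
            rw [hstep]
            simp only [goB, if_neg (by decide : ¬('}' = '{')), if_pos hclose]
            simpa using ih cs (p + 1) _ out (depth - 1) pending hlen' hdrop' hnew
          · -- closing brace inside template, still nested
            have hstep : stepA st ((p : Int), '}') =
                { st with nClose := st.nClose + 1, prev := some '}' } := by
              have hne : ¬(st.nOpen = st.nClose + 1) := by omega
              simp [stepA, hT, hc, hne]
            have hnew : LoopInv cs (p + 1)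
                { st with nClose := st.nClose + 1, prev := some '}' } out (depth - 1) pending := by
              unfold LoopInv
              refine ⟨by omega, ?_⟩
              simp only [hT, if_true]
              exact ⟨hpend, hlenSE, by omega, by omega, hout⟩
            rw [hstep]
            simp only [goB, if_neg (by decide : ¬('}' = '{')), if_neg hclose]
            simpa [hT] using ih cs (p + 1) _ out (depth - 1) pending hlen' hdrop' hnew
        · -- ordinary character inside template
          have hstep : stepA st ((p : Int), c) = { st with prev := some c } := by
            have hne : ¬(st.nOpen = st.nClose) := by omega
            simp [stepA, hT, hc, hc2, hne]
          have hnew : LoopInv cs (p + 1) { st with prev := some c } out depth pending := by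
            unfold LoopInv
            refine ⟨by omega, ?_⟩
            simp only [hT, if_true]
            exact ⟨hpend, hlenSE, hdepth, hdep1, hout⟩
          rw [hstep]
          simp only [goB, if_true, if_neg hc, if_neg hc2]
          simpa [hT] using ih cs (p + 1) _ out depth pending hlen' hdrop' hnew
    | false =>
      rw [hT] at hIf; simp only [if_false, Bool.false_eq_true] at hIf
      obtain ⟨hpend, hnO, hnC, hlenSE, hl0, hl1, hout, hpi⟩ := hIf
      by_cases hc : c = '{'
      · subst hc
        cases hpd : pending with
        | true =>
          -- second '{' of '{{': template opens at p - 1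
          have hprev : st.prev = some '{' := hpend.mp hpd
          obtain ⟨hp1, hcpm, hl2⟩ := hpi hpd
          have hstep : stepA st ((p : Int), '{') =
              { st with nOpen := 2, starts := st.starts ++ [(p : Int) - 1],
                        inTemplate := true, prev := some '{' } := by
            simp [stepA, hT, hprev, hnC]
          have hnew : LoopInv cs (p + 1)
              { st with nOpen := 2, starts := st.starts ++ [(p : Int) - 1],
                        inTemplate := true, prev := some '{' } out 2 false := by
            unfold LoopInv
            refine ⟨by omega, ?_, ?_, ?_, ?_, ?_⟩
            · rfl
            · simp [hlenSE]
            · show (2 : Int) = 2 - st.nClose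
              omega
            · show (1 : Int) ≤ 2
              norm_num
            · -- out = PJ of the extended starts list
              rw [PJ_starts_append cs st.starts st.ends ((p : Int) - 1) hlenSE]
              rw [hpd] at hout
              have hsnoc := slice_snoc cs (lastE st.ends + 1) (p - 1) (by omega)
                (by omega) '{' hcpm
              rw [show (((p - 1 : Nat) : Int) + 1) = (p : Int) by omega,
                show ((p - 1 : Nat) : Int) = (p : Int) - 1 by omega] at hsnoc
              rw [hsnoc, ← List.append_assoc] at hout
              exact List.append_cancel_right (by simpa using hout)
          rw [hstep]
          simp only [goB, Bool.false_eq_true, if_false, if_true]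
          simpa using ih cs (p + 1) _ out 2 false hlen' hdrop' hnew
        | false =>
          -- first lone '{': becomes pending
          have hprev : st.prev ≠ some '{' := fun hx => by simp [hpend.mpr hx] at hpd
          have hstep : stepA st ((p : Int), '{') = { st with prev := some '{' } := by
            simp [stepA, hT, hprev]
          have hsnoc := slice_snoc cs (lastE st.ends + 1) p (by omega) hl1 '{' hcp
          have hnew : LoopInv cs (p + 1) { st with prev := some '{' } out depth true := by
            unfold LoopInv
            refine ⟨by omega, ?_⟩
            simp only [hT, if_false, Bool.false_eq_true]
            refine ⟨by simp, hnO, hnC, hlenSE, hl0, by push_cast; omega, ?_, ?_⟩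
            · rw [hpd] at hout
              rw [show (((p + 1 : Nat)) : Int) = ((p : Int) + 1) by push_cast; ring, hsnoc,
                ← List.append_assoc, ← hout]
              simp
            · intro _
              refine ⟨by omega, ?_, by push_cast; omega⟩
              simpa using hcp
          rw [hstep]
          simp only [goB, Bool.false_eq_true, if_false]
          simpa [hT] using ih cs (p + 1) _ out depth true hlen' hdrop' hnew
      · -- ordinary character outside template: emitted
        have hstep : stepA st ((p : Int), c) = { st with prev := some c } := by
          simp [stepA, hT, hc]
        have hsnoc := slice_snoc cs (lastE st.ends + 1) p (by omega) hl1 c hcp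
        have hnew : LoopInv cs (p + 1) { st with prev := some c }
            ((out ++ (if pending = true then ['{'] else [])) ++ [c]) depth false := by
          unfold LoopInv
          refine ⟨by omega, ?_⟩
          simp only [hT, if_false, Bool.false_eq_true]
          refine ⟨by simp [hc], hnO, hnC, hlenSE, hl0, by push_cast; omega, ?_, by simp⟩
          rw [show (((p + 1 : Nat)) : Int) = ((p : Int) + 1) by push_cast; ring, hsnoc,
            ← List.append_assoc, ← hout]
          simp
        rw [hstep]
        simp only [goB, Bool.false_eq_true, if_false, if_neg hc]
        simpa [hT] using ih cs (p + 1) _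
          ((out ++ (if pending = true then ['{'] else [])) ++ [c]) depth false hlen' hdrop' hnew

-- ===== VERDICT (by name: the statement is the Claim_ definition above) =====
theorem remove_template_spec : Claim_equal_remove_template := by
  intro s _
  unfold Spec_remove_template remove_template remove_template_alt
  have hInv : LoopInv s.toList 0 ⟨0, 0, [], [], false, none⟩ [] 0 false := by
    unfold LoopInv PJ lastE
    simp
    rw [PySem.List.slice_to s.toList (show (0:Int) ≤ 0 by norm_num)]
    simp
  have h := main_inv s.toList s.toList 0 ⟨0, 0, [], [], false, none⟩ [] 0 false
    (by simp) (by simp) hInv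
  exact congrArg String.ofList (by simpa using h)
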